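-- pv_equiv track=rewrite | github.com/SidDas03/PhishGuard | backend/feature_extractor.py | _split_domain
-- ===== SOURCE A (Python) =====
-- from typing import Dict, Any
--
-- def _split_domain(host: str) -> Dict[str, str]:
--     """Split host into subdomain, domain, tld."""
--     MULTI = ["co.uk","co.in","com.au","co.nz","org.uk","net.uk",
--              "ac.uk","gov.uk","co.za","com.br","co.jp","edu.au","gov.au"]
--     h = host.lower()
--     for m in MULTI:
--         if h.endswith("."+m):
--             rest  = h[:-(len(m)+1)]
--             parts = rest.split(".")
--             return {"subdomain": ".".join(parts[:-1]), "domain": parts[-1] if parts else "", "tld": m}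
--     parts = h.split(".")
--     if len(parts) >= 2:
--         return {"subdomain": ".".join(parts[:-2]), "domain": parts[-2], "tld": parts[-1]}
--     return {"subdomain": "", "domain": h, "tld": ""}
-- ===== SOURCE B (Python) =====
-- MULTI_SET = {"co.uk","co.in","com.au","co.nz","org.uk","net.uk",
--              "ac.uk","gov.uk","co.za","com.br","co.jp","edu.au","gov.au"}
--
-- def _split_domain(host: str):
--     """Split host into subdomain, domain, tld by matching the labels right-to-left."""
--     match host.lower().split(".")[::-1]:
--         case [l0, l1, l2, *rest] if f"{l1}.{l0}" in MULTI_SET: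
--             return {"subdomain": ".".join(rest[::-1]), "domain": l2, "tld": f"{l1}.{l0}"}
--         case [l0, l1, *rest]:
--             return {"subdomain": ".".join(rest[::-1]), "domain": l1, "tld": l0}
--         case _:
--             return {"subdomain": "", "domain": host.lower(), "tld": ""}
-- ===== Notes on version B (the rewrite author's own statement) =====
-- stated objective: idiomatic
-- what changed: Instead of scanning 13 multi-part suffixes with endswith and re-splitting the remainder, B splits the lowercased host into labels once, reverses them, and structurally pattern-matches the last labels (match/case), with one set lookup deciding the multi-part-TLD case.
import Mathlib
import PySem

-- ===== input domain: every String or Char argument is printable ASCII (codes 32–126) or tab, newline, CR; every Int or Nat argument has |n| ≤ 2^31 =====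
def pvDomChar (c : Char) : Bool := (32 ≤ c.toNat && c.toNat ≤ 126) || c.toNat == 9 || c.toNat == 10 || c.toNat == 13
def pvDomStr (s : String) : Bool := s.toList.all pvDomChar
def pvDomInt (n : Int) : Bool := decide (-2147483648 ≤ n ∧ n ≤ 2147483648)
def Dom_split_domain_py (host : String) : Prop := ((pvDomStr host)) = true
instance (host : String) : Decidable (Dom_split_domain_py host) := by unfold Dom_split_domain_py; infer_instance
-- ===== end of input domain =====

-- B replaces A's 13-fold endswith scan + re-split of the remainder by one split into labels,
-- reversed, and a structural match on the trailing labels with a single set lookup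
-- (objective: idiomatic; return value only).

-- ===== PORT A =====
-- shared primitive ports of Python expressions used by both sides:
-- pyDot m = "." + m; pySplitDot s = s.split(".") — PySem.Str only offers the Option-valued
-- split?; the separator "." is non-empty, so PySem.Chars.splitOn is exact here.
def pyDot (m : String) : String := String.ofList ('.' :: m.toList)
def pySplitDot (s : String) : List String := (PySem.Chars.splitOn s.toList ['.']).map String.ofList

def pvMULTI : List String := ["co.uk","co.in","com.au","co.nz","org.uk","net.uk",
  "ac.uk","gov.uk","co.za","com.br","co.jp","edu.au","gov.au"]

-- the 'for m in MULTI' loop of A; 'parts[-1] if parts else ""' is guarded, so pyGet?'s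
-- default "" is unreachable under the guard.
def splitDomainLoop (h : String) : List String → Option (List (String × String))
  | [] => none
  | m :: ms =>
    if PySem.Str.endswith h (pyDot m) then
      let rest := PySem.Str.slice h none (some (-(PySem.Str.len m + 1)))
      let parts := pySplitDot rest
      some [("subdomain", PySem.Str.join "." (PySem.List.slice parts none (some (-1)))),
            ("domain", if parts ≠ [] then (PySem.List.pyGet? parts (-1)).getD "" else ""),
            ("tld", m)]
    else splitDomainLoop h ms

def split_domain_py (host : String) : List (String × String) :=
  let h := PySem.Str.lower host
  match splitDomainLoop h pvMULTI with
  | some d => d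
  | none =>
    let parts := pySplitDot h
    if 2 ≤ parts.length then
      [("subdomain", PySem.Str.join "." (PySem.List.slice parts none (some (-2)))),
       ("domain", (PySem.List.pyGet? parts (-2)).getD ""),
       ("tld", (PySem.List.pyGet? parts (-1)).getD "")]
    else [("subdomain", ""), ("domain", h), ("tld", "")]

-- ===== PORT B =====
def pvMULTI_SET : PySem.Set String := PySem.Set.ofList ["co.uk","co.in","com.au","co.nz",
  "org.uk","net.uk","ac.uk","gov.uk","co.za","com.br","co.jp","edu.au","gov.au"]

-- Source B's match/case on host.lower().split(".")[::-1]: the [::-1] and rest[::-1] slices are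
-- ported as List.reverse (exact: PySem.List.slice?_none_none_neg_one), the f-string
-- f"{l1}.{l0}" as the literal character concatenation, the guarded first case as the
-- three-label pattern plus an 'if' on the guard (the guard-failed fall-through to the
-- second case is its 'else').
def split_domain_py_alt (host : String) : List (String × String) :=
  match (pySplitDot (PySem.Str.lower host)).reverse with
  | l0 :: l1 :: l2 :: rest =>
    let t2 := String.ofList (l1.toList ++ '.' :: l0.toList)
    if t2 ∈ pvMULTI_SET then
      [("subdomain", PySem.Str.join "." rest.reverse), ("domain", l2), ("tld", t2)]
    else
      [("subdomain", PySem.Str.join "." (l2 :: rest).reverse), ("domain", l1), ("tld", l0)]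
  | l0 :: l1 :: rest =>
    [("subdomain", PySem.Str.join "." rest.reverse), ("domain", l1), ("tld", l0)]
  | _ => [("subdomain", ""), ("domain", PySem.Str.lower host), ("tld", "")]

-- ===== PRECONDITION & SPEC =====
def Spec_split_domain_py (host : String) (out : List (String × String)) : Prop := out = split_domain_py_alt host
instance (host : String) (out : List (String × String)) : Decidable (Spec_split_domain_py host out) := by unfold Spec_split_domain_py; infer_instance

-- ===== CLAIM (what is proved, stated in full; the proofs are below) =====
def Claim_equal_split_domain_py : Prop := ∀ (host : String), Dom_split_domain_py host → Spec_split_domain_py host (split_domain_py host)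

-- ===== LEMMAS AND PROOFS =====

-- reference one-pass split on '.', used only by the proofs
def splitDot : List Char → List (List Char)
  | [] => [[]]
  | c :: rest =>
    if c = '.' then [] :: splitDot rest
    else match splitDot rest with
      | p :: ps => (c :: p) :: ps
      | [] => [[c]]

theorem splitDot_ne_nil (l : List Char) : splitDot l ≠ [] := by
  cases l with
  | nil => simp [splitDot]
  | cons c rest =>
    simp only [splitDot]
    split
    · simp
    · cases h : splitDot rest <;> simp

theorem go_spec (fuel : Nat) (l cur : List Char) (acc : List (List Char))
    (hf : l.length < fuel) :
    PySem.Chars.splitOn.go ['.'] fuel l cur acc =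
      acc.reverse ++ ((cur.reverse ++ (splitDot l).headI) :: (splitDot l).tail) := by
  induction fuel generalizing l cur acc with
  | zero => omega
  | succ f ih =>
    cases l with
    | nil => simp [PySem.Chars.splitOn.go, splitDot]
    | cons c rest =>
      rw [PySem.Chars.splitOn.go]
      by_cases hc : c = '.'
      · subst hc
        have hpre : List.isPrefixOf ['.'] ('.' :: rest) = true := by simp [List.isPrefixOf]
        simp only [hpre, if_true, List.length_cons] at *
        simp only [List.length_nil, List.drop_succ_cons, List.drop_zero]
        rw [ih rest [] (List.reverse cur :: acc) (by simpa using hf)]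
        rcases h : splitDot rest with _ | ⟨p, ps⟩
        · exact absurd h (splitDot_ne_nil rest)
        · simp [splitDot, h]
      · have hpre : List.isPrefixOf ['.'] (c :: rest) = false := by
          simp [List.isPrefixOf]; exact fun h => absurd h.symm hc
        simp only [hpre, Bool.false_eq_true, if_false]
        rw [ih rest (c :: cur) acc (by simp at hf ⊢; omega)]
        rcases h : splitDot rest with _ | ⟨p, ps⟩
        · exact absurd h (splitDot_ne_nil rest)
        · simp [splitDot, h, hc]

theorem splitOn_eq_splitDot (l : List Char) :
    PySem.Chars.splitOn l ['.'] = splitDot l := by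
  rw [PySem.Chars.splitOn, go_spec _ _ _ _ (by omega)]
  rcases h : splitDot l with _ | ⟨p, ps⟩
  · exact absurd h (splitDot_ne_nil l)
  · simp

theorem splitDot_append (a b : List Char) :
    splitDot (a ++ '.' :: b) = splitDot a ++ splitDot b := by
  induction a with
  | nil => simp [splitDot]
  | cons c a ih =>
    by_cases hc : c = '.'
    · subst hc; simp [splitDot, ih]
    · simp only [List.cons_append, splitDot, hc, if_false, ih]
      rcases h : splitDot a with _ | ⟨p, ps⟩
      · exact absurd h (splitDot_ne_nil a)
      · simp

theorem intercalate_cons₂ {α : Type} (sep x : List α) (ys : List (List α)) (h : ys ≠ []) :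
    List.intercalate sep (x :: ys) = x ++ sep ++ List.intercalate sep ys := by
  rcases ys with _ | ⟨y, ys⟩
  · exact absurd rfl h
  · simp [List.intercalate, List.intersperse, List.append_assoc]

theorem intercalate_splitDot (l : List Char) :
    List.intercalate ['.'] (splitDot l) = l := by
  induction l with
  | nil => simp [splitDot, List.intercalate]
  | cons c rest ih =>
    by_cases hc : c = '.'
    · subst hc
      simp only [splitDot, if_true]
      rw [intercalate_cons₂ _ _ _ (splitDot_ne_nil rest), ih]
      simp
    · simp only [splitDot, hc, if_false]
      rcases h : splitDot rest with _ | ⟨p, ps⟩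
      · exact absurd h (splitDot_ne_nil rest)
      · rw [h] at ih
        rcases ps with _ | ⟨q, qs⟩
        · simp_all [List.intercalate]
        · rw [intercalate_cons₂ _ _ _ (by simp)] at ih ⊢
          simp_all

theorem length_two {α : Type} {l : List α} (h : l.length = 2) : ∃ x y, l = [x, y] := by
  rcases l with _ | ⟨x, _ | ⟨y, _ | ⟨z, t⟩⟩⟩
  · simp at h
  · simp at h
  · exact ⟨x, y, rfl⟩
  · simp at h

theorem intercalate_pair (x y : List Char) :
    List.intercalate ['.'] [x, y] = x ++ '.' :: y := by
  rw [intercalate_cons₂ _ _ _ (by simp)]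
  simp [List.intercalate]

theorem intercalate_append_two (q : List (List Char)) (x y : List Char) (hq : q ≠ []) :
    List.intercalate ['.'] (q ++ [x, y]) = List.intercalate ['.'] q ++ '.' :: (x ++ '.' :: y) := by
  induction q with
  | nil => exact absurd rfl hq
  | cons a q ih =>
    rcases q with _ | ⟨b, q⟩
    · rw [List.singleton_append, intercalate_cons₂ _ _ _ (by simp), intercalate_pair]
      simp [List.intercalate]
    · rw [List.cons_append, intercalate_cons₂ ['.'] a ((b :: q) ++ [x, y]) (by simp), ih (by simp),
          intercalate_cons₂ ['.'] a (b :: q) (by simp)]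
      simp [List.append_assoc]

theorem pvMULTI_len2 : ∀ m ∈ pvMULTI, (splitDot m.toList).length = 2 := by decide

theorem parts_eq (s : String) : pySplitDot s = (splitDot s.toList).map String.ofList := by
  rw [pySplitDot, splitOn_eq_splitDot]

theorem join_toList (parts : List String) :
    (PySem.Str.join "." parts).toList = List.intercalate ['.'] (parts.map String.toList) := by
  rw [PySem.Str.toList_join, PySem.Chars.join]
  rfl

-- a two-label suffix match determines the host's decomposition
theorem endswith_decomp (h m : String) (hend : PySem.Str.endswith h (pyDot m) = true) :
    ∃ r, r ++ '.' :: m.toList = h.toList := by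
  rw [PySem.Str.endswith, PySem.Chars.endswith_iff] at hend
  obtain ⟨r, hr⟩ := hend
  exact ⟨r, by simpa [pyDot] using hr⟩

theorem endswith_of_decomp (h m : String) (r : List Char) (hr : r ++ '.' :: m.toList = h.toList) :
    PySem.Str.endswith h (pyDot m) = true := by
  rw [PySem.Str.endswith, PySem.Chars.endswith_iff]
  exact ⟨r, by simpa [pyDot] using hr⟩

theorem suffix_uniq (h m m' : String)
    (hm2 : (splitDot m.toList).length = 2) (hm2' : (splitDot m'.toList).length = 2)
    (he : PySem.Str.endswith h (pyDot m) = true)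
    (he' : PySem.Str.endswith h (pyDot m') = true) : m' = m := by
  obtain ⟨r, hr⟩ := endswith_decomp h m he
  obtain ⟨r', hr'⟩ := endswith_decomp h m' he'
  have hsd : splitDot r ++ splitDot m.toList = splitDot r' ++ splitDot m'.toList := by
    rw [← splitDot_append, ← splitDot_append, hr, hr']
  have htails := (List.append_inj' hsd (by omega)).2
  have : m'.toList = m.toList := by
    rw [← intercalate_splitDot m'.toList, ← intercalate_splitDot m.toList, htails]
  exact String.toList_inj.mp this

-- the branch body of A's loop, named for the proofs
def branchA (h m : String) : List (String × String) :=
  let rest := PySem.Str.slice h none (some (-(PySem.Str.len m + 1)))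
  let parts := pySplitDot rest
  [("subdomain", PySem.Str.join "." (PySem.List.slice parts none (some (-1)))),
   ("domain", if parts ≠ [] then (PySem.List.pyGet? parts (-1)).getD "" else ""),
   ("tld", m)]

-- B's value reformulated through negative slices of the unreversed label list; the
-- bridge alt_eq below proves split_domain_py_alt equals it, and the main proof targets it.
def altSlice (host : String) : List (String × String) :=
  let parts := pySplitDot (PySem.Str.lower host)
  let tld2 := PySem.Str.join "." (PySem.List.slice parts (some (-2)) none)
  if 3 ≤ parts.length ∧ tld2 ∈ pvMULTI_SET then
    [("subdomain", PySem.Str.join "." (PySem.List.slice parts none (some (-3)))),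
     ("domain", (PySem.List.pyGet? parts (-3)).getD ""),
     ("tld", tld2)]
  else if 2 ≤ parts.length then
    [("subdomain", PySem.Str.join "." (PySem.List.slice parts none (some (-2)))),
     ("domain", (PySem.List.pyGet? parts (-2)).getD ""),
     ("tld", (PySem.List.pyGet? parts (-1)).getD "")]
  else [("subdomain", ""), ("domain", PySem.Str.lower host), ("tld", "")]

theorem loop_none (h : String) (ms : List String)
    (hall : ∀ m ∈ ms, PySem.Str.endswith h (pyDot m) = false) :
    splitDomainLoop h ms = none := by
  induction ms with
  | nil => rfl
  | cons m ms ih =>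
    rw [splitDomainLoop, if_neg (by rw [hall m (by simp)]; simp), ih (fun m' hm' => hall m' (by simp [hm']))]

theorem loop_first (h : String) (ms : List String) (m : String) (hm : m ∈ ms)
    (hend : PySem.Str.endswith h (pyDot m) = true)
    (huniq : ∀ m' ∈ ms, PySem.Str.endswith h (pyDot m') = true → m' = m) :
    splitDomainLoop h ms = some (branchA h m) := by
  induction ms with
  | nil => simp at hm
  | cons m0 ms ih =>
    by_cases h0 : PySem.Str.endswith h (pyDot m0) = true
    · have : m0 = m := huniq m0 (by simp) h0
      subst this
      rw [splitDomainLoop, if_pos h0]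
      rfl
    · have hm' : m ∈ ms := by
        rcases hm with _ | hm
        · exact absurd hend h0
        · assumption
      rw [splitDomainLoop, if_neg h0]
      exact ih hm' (fun m' hmm => huniq m' (by simp [hmm]))

theorem pyGet?_neg {α : Type} (xs : List α) (j : Nat) (hj : 1 ≤ j) (h : j ≤ xs.length) :
    PySem.List.pyGet? xs (-(j : Int)) = xs[xs.length - j]? := by
  rw [PySem.List.pyGet?, PySem.List.pyIdx?]
  rw [if_neg (by omega), if_pos (by omega)]
  simp

theorem reduceA_some (host : String) (d : List (String × String))
    (hl : splitDomainLoop (PySem.Str.lower host) pvMULTI = some d) :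
    split_domain_py host = d := by
  simp only [split_domain_py, hl]

theorem rest_eq (g m : String) (r : List Char) (hr : r ++ '.' :: m.toList = g.toList) :
    (PySem.Str.slice g none (some (-(PySem.Str.len m + 1)))).toList = r := by
  rw [PySem.Str.toList_slice, PySem.Chars.slice_eq_listSlice]
  have hlen : -(PySem.Str.len m + 1) = -((m.toList.length + 1 : Nat) : Int) := by
    rw [PySem.Str.len]; push_cast; ring
  rw [hlen, PySem.List.slice_to_neg_natCast _ _ (by omega), ← hr]
  have hlength : (r ++ '.' :: m.toList).length - (m.toList.length + 1) = r.length := by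
    simp
  rw [hlength, List.take_left]

theorem partsB_eq (g m : String) (r x y : List Char)
    (hr : r ++ '.' :: m.toList = g.toList) (hxy : splitDot m.toList = [x, y]) :
    pySplitDot g = (splitDot r).map String.ofList ++ [String.ofList x, String.ofList y] := by
  rw [parts_eq, ← hr, splitDot_append, hxy, List.map_append]
  rfl

theorem tld2_eq (g m : String) (r x y : List Char)
    (hr : r ++ '.' :: m.toList = g.toList) (hxy : splitDot m.toList = [x, y]) :
    PySem.Str.join "." (PySem.List.slice (pySplitDot g) (some (-2)) none) = m := by
  rw [partsB_eq g m r x y hr hxy,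
      PySem.List.slice_from_neg_ofNat _ 2 (by norm_num)]
  have h2 : ((splitDot r).map String.ofList ++ [String.ofList x, String.ofList y]).length - 2
      = ((splitDot r).map String.ofList).length := by simp
  rw [h2, List.drop_left]
  apply String.toList_inj.mp
  rw [join_toList]
  have hmxy : m.toList = x ++ '.' :: y := by
    conv_lhs => rw [← intercalate_splitDot m.toList, hxy, intercalate_pair]
  simp [intercalate_pair, hmxy]

theorem bcond_true (g m : String) (hmem : m ∈ pvMULTI)
    (hend : PySem.Str.endswith g (pyDot m) = true) :
    3 ≤ (pySplitDot g).length ∧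
      PySem.Str.join "." (PySem.List.slice (pySplitDot g) (some (-2)) none) ∈ pvMULTI_SET := by
  obtain ⟨r, hr⟩ := endswith_decomp g m hend
  obtain ⟨x, y, hxy⟩ := length_two (pvMULTI_len2 m hmem)
  have hk : 1 ≤ (splitDot r).length := List.length_pos_iff.mpr (splitDot_ne_nil r)
  constructor
  · rw [partsB_eq g m r x y hr hxy]
    simp only [List.length_append, List.length_map, List.length_cons, List.length_nil]
    omega
  · rw [tld2_eq g m r x y hr hxy]
    exact (PySem.Set.mem_ofList pvMULTI m).mpr hmem

theorem branch_eq (g m : String) (hmem : m ∈ pvMULTI)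
    (hend : PySem.Str.endswith g (pyDot m) = true) :
    branchA g m =
      [("subdomain", PySem.Str.join "." (PySem.List.slice (pySplitDot g) none (some (-3)))),
       ("domain", (PySem.List.pyGet? (pySplitDot g) (-3)).getD ""),
       ("tld", PySem.Str.join "." (PySem.List.slice (pySplitDot g) (some (-2)) none))] := by
  obtain ⟨r, hr⟩ := endswith_decomp g m hend
  obtain ⟨x, y, hxy⟩ := length_two (pvMULTI_len2 m hmem)
  have hk : 1 ≤ (splitDot r).length := List.length_pos_iff.mpr (splitDot_ne_nil r)
  have hpa : pySplitDot (PySem.Str.slice g none (some (-(PySem.Str.len m + 1))))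
      = (splitDot r).map String.ofList := by
    rw [parts_eq, rest_eq g m r hr]
  have hpb := partsB_eq g m r x y hr hxy
  have hlen3 : ((splitDot r).map String.ofList ++ [String.ofList x, String.ofList y]).length - 3
      = ((splitDot r).map String.ofList).length - 1 := by
    simp only [List.length_append, List.length_map, List.length_cons, List.length_nil]
    omega
  have hsub : PySem.List.slice (pySplitDot (PySem.Str.slice g none (some (-(PySem.Str.len m + 1))))) none (some (-1))
      = PySem.List.slice (pySplitDot g) none (some (-3)) := by
    rw [PySem.List.slice_to_neg_one, PySem.List.slice_to_neg_ofNat _ 3 (by norm_num), hpa, hpb,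
        List.take_append_of_le_length (by rw [hlen3]; simp only [List.length_map]; omega),
        List.dropLast_eq_take, hlen3]
  have hdomA : PySem.List.pyGet? (pySplitDot (PySem.Str.slice g none (some (-(PySem.Str.len m + 1))))) (-1)
      = PySem.List.pyGet? (pySplitDot g) (-3) := by
    have e1 : ((-1 : Int)) = -((1 : Nat) : Int) := by norm_num
    have e3 : ((-3 : Int)) = -((3 : Nat) : Int) := by norm_num
    rw [e1, e3, pyGet?_neg _ 1 (by omega) (by rw [hpa]; simp only [List.length_map]; omega),
        pyGet?_neg _ 3 (by omega) (by rw [hpb]; simp only [List.length_append, List.length_map,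
          List.length_cons, List.length_nil]; omega),
        hpa, hpb, hlen3,
        List.getElem?_append_left (by simp only [List.length_map]; omega)]
  have hne : pySplitDot (PySem.Str.slice g none (some (-(PySem.Str.len m + 1)))) ≠ [] := by
    rw [hpa]
    simp only [ne_eq, List.map_eq_nil_iff]
    exact splitDot_ne_nil r
  simp only [branchA]
  rw [if_pos hne, hsub, hdomA, tld2_eq g m r x y hr hxy]

theorem bcond_false (g : String)
    (hall : ∀ m ∈ pvMULTI, PySem.Str.endswith g (pyDot m) = false) :
    ¬(3 ≤ (pySplitDot g).length ∧
      PySem.Str.join "." (PySem.List.slice (pySplitDot g) (some (-2)) none) ∈ pvMULTI_SET) := by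
  rintro ⟨h3, hmemS⟩
  have hmem := (PySem.Set.mem_ofList pvMULTI _).mp hmemS
  have h3' : 3 ≤ (splitDot g.toList).length := by
    rw [parts_eq] at h3
    simpa using h3
  obtain ⟨x, y, hxy⟩ := length_two
    (l := List.drop ((splitDot g.toList).length - 2) (splitDot g.toList))
    (by rw [List.length_drop]; omega)
  have hqd : splitDot g.toList
      = List.take ((splitDot g.toList).length - 2) (splitDot g.toList) ++ [x, y] := by
    conv_lhs => rw [← List.take_append_drop ((splitDot g.toList).length - 2) (splitDot g.toList), hxy]
  have hq : List.take ((splitDot g.toList).length - 2) (splitDot g.toList) ≠ [] := by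
    intro e
    have := congrArg List.length e
    simp only [List.length_take, List.length_nil] at this
    omega
  generalize hQ : List.take ((splitDot g.toList).length - 2) (splitDot g.toList) = q at hqd hq
  have htl : (PySem.Str.join "." (PySem.List.slice (pySplitDot g) (some (-2)) none)).toList
      = x ++ '.' :: y := by
    rw [PySem.List.slice_from_neg_ofNat _ 2 (by norm_num), parts_eq, hqd, List.map_append]
    rw [show (List.map String.ofList q ++ List.map String.ofList [x, y]).length - 2
        = (List.map String.ofList q).length from by
          simp only [List.length_append, List.length_map, List.length_cons, List.length_nil]
          omega]
    rw [List.drop_left, join_toList]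
    simp [intercalate_pair]
  have hdec : List.intercalate ['.'] q ++
      '.' :: (PySem.Str.join "." (PySem.List.slice (pySplitDot g) (some (-2)) none)).toList = g.toList := by
    rw [htl, ← intercalate_append_two q x y hq, ← hqd, intercalate_splitDot]
  have := endswith_of_decomp g _ _ hdec
  rw [hall _ hmem] at this
  simp at this

theorem main_pos (host m : String) (hmem : m ∈ pvMULTI)
    (hend : PySem.Str.endswith (PySem.Str.lower host) (pyDot m) = true) :
    split_domain_py host = altSlice host := by
  have hA : split_domain_py host = branchA (PySem.Str.lower host) m :=
    reduceA_some host _ (loop_first _ pvMULTI m hmem hend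
      (fun m' hm' he' => suffix_uniq _ m m' (pvMULTI_len2 m hmem) (pvMULTI_len2 m' hm') hend he'))
  rw [hA, branch_eq _ m hmem hend]
  simp only [altSlice]
  rw [if_pos (bcond_true _ m hmem hend)]

theorem main_neg (host : String)
    (hall : ∀ m ∈ pvMULTI, PySem.Str.endswith (PySem.Str.lower host) (pyDot m) = false) :
    split_domain_py host = altSlice host := by
  have hloop := loop_none _ pvMULTI hall
  simp only [split_domain_py, altSlice, hloop, if_neg (bcond_false _ hall)]

theorem A_eq_altSlice (host : String) : split_domain_py host = altSlice host := by
  by_cases hc : ∃ m ∈ pvMULTI, PySem.Str.endswith (PySem.Str.lower host) (pyDot m) = true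
  · obtain ⟨m, hm, he⟩ := hc
    exact main_pos host m hm he
  · refine main_neg host (fun m hm => ?_)
    cases hbe : PySem.Str.endswith (PySem.Str.lower host) (pyDot m) with
    | false => rfl
    | true => exact absurd ⟨m, hm, hbe⟩ hc

-- bridging B's reversed-pattern form to the slice form altSlice

theorem slice_tail2 (q : List String) (a b : String) :
    PySem.List.slice (q ++ [a, b]) (some (-2)) none = [a, b] := by
  rw [PySem.List.slice_from_neg_ofNat _ 2 (by norm_num)]
  have : (q ++ [a, b]).length - 2 = q.length := by simp
  rw [this, List.drop_left]

theorem slice_take2 (q : List String) (a b : String) :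
    PySem.List.slice (q ++ [a, b]) none (some (-2)) = q := by
  rw [PySem.List.slice_to_neg_ofNat _ 2 (by norm_num)]
  have : (q ++ [a, b]).length - 2 = q.length := by simp
  rw [this, List.take_left]

theorem get_neg_tail2a (q : List String) (a b : String) :
    PySem.List.pyGet? (q ++ [a, b]) (-2) = some a := by
  rw [show ((-2 : Int)) = -((2 : Nat) : Int) from by norm_num,
      pyGet?_neg _ 2 (by omega) (by simp)]
  have : (q ++ [a, b]).length - 2 = q.length := by simp
  rw [this, List.getElem?_append_right (le_refl _)]
  simp

theorem get_neg_tail2b (q : List String) (a b : String) :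
    PySem.List.pyGet? (q ++ [a, b]) (-1) = some b := by
  rw [show ((-1 : Int)) = -((1 : Nat) : Int) from by norm_num,
      pyGet?_neg _ 1 (by omega) (by simp)]
  have h : (q ++ [a, b]).length - 1 = q.length + 1 := by simp
  rw [h, List.getElem?_append_right (by omega)]
  simp

theorem join_pair (a b : String) :
    PySem.Str.join "." [a, b] = String.ofList (a.toList ++ '.' :: b.toList) := by
  apply String.toList_inj.mp
  rw [join_toList]
  simp [intercalate_pair]

theorem alt_eq (host : String) : split_domain_py_alt host = altSlice host := by
  have hne : pySplitDot (PySem.Str.lower host) ≠ [] := by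
    rw [parts_eq]
    simp only [ne_eq, List.map_eq_nil_iff]
    exact splitDot_ne_nil _
  rcases hrev : (pySplitDot (PySem.Str.lower host)).reverse with _ | ⟨l0, tl⟩
  · exact absurd (by simpa using congrArg List.reverse hrev) hne
  rcases tl with _ | ⟨l1, tl2⟩
  · -- single label: parts = [l0]
    have hp : pySplitDot (PySem.Str.lower host) = [l0] := by
      simpa using congrArg List.reverse hrev
    simp only [split_domain_py_alt, altSlice, hp]
    norm_num
  rcases tl2 with _ | ⟨l2, rest⟩
  · -- two labels: parts = [l1, l0]
    have hp : pySplitDot (PySem.Str.lower host) = [l1, l0] := by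
      simpa using congrArg List.reverse hrev
    simp only [split_domain_py_alt, altSlice, hp]
    rw [if_neg (by norm_num), if_pos (by norm_num)]
    rw [show ([l1, l0] : List String) = [] ++ [l1, l0] from rfl,
        slice_take2, get_neg_tail2a, get_neg_tail2b]
    simp [PySem.Str.join]
  · -- three or more labels: parts = rest.reverse ++ [l2, l1, l0]
    have hp : pySplitDot (PySem.Str.lower host) = rest.reverse ++ [l2, l1, l0] := by
      have := congrArg List.reverse hrev
      simpa using this
    have htld2 : PySem.Str.join "." (PySem.List.slice (pySplitDot (PySem.Str.lower host)) (some (-2)) none)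
        = String.ofList (l1.toList ++ '.' :: l0.toList) := by
      rw [hp, show rest.reverse ++ [l2, l1, l0] = (rest.reverse ++ [l2]) ++ [l1, l0] from by simp,
          slice_tail2, join_pair]
    have h3 : 3 ≤ (pySplitDot (PySem.Str.lower host)).length := by
      rw [hp]; simp
    simp only [split_domain_py_alt, altSlice, hrev]
    by_cases hmem : String.ofList (l1.toList ++ '.' :: l0.toList) ∈ pvMULTI_SET
    · rw [if_pos hmem, if_pos ⟨h3, by rw [htld2]; exact hmem⟩, htld2]
      have hsub : PySem.List.slice (pySplitDot (PySem.Str.lower host)) none (some (-3)) = rest.reverse := by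
        rw [hp, PySem.List.slice_to_neg_ofNat _ 3 (by norm_num)]
        have : (rest.reverse ++ [l2, l1, l0]).length - 3 = rest.reverse.length := by simp
        rw [this, List.take_left]
      have hdom : PySem.List.pyGet? (pySplitDot (PySem.Str.lower host)) (-3) = some l2 := by
        rw [hp, show ((-3 : Int)) = -((3 : Nat) : Int) from by norm_num,
            pyGet?_neg _ 3 (by omega) (by simp)]
        have : (rest.reverse ++ [l2, l1, l0]).length - 3 = rest.reverse.length := by simp
        rw [this, List.getElem?_append_right (le_refl _)]
        simp
      rw [hsub, hdom]
      rfl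
    · rw [if_neg hmem, if_neg (by rw [htld2]; exact fun h => hmem h.2), if_pos (by omega)]
      have hq : pySplitDot (PySem.Str.lower host) = (l2 :: rest).reverse ++ [l1, l0] := by
        rw [hp]; simp
      rw [hq, slice_take2, get_neg_tail2a, get_neg_tail2b]
      rfl

-- ===== VERDICT (by name: the statement is the Claim_ definition above) =====
theorem split_domain_py_spec : Claim_equal_split_domain_py := by
  intro host _
  unfold Spec_split_domain_py
  rw [alt_eq, A_eq_altSlice]
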